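-- pv_equiv track=rewrite | github.com/xandao-dev/flyff-bots | farm.py | get_circles
-- ===== SOURCE A (Python) =====
-- def get_circles(radius, border):
--     circles = []
--     for x in range(round(radius*2)):
--         for y in range(round(radius*2)):
--             circle_eq = round((x-radius)**2 + (y-radius)**2)
--             if circle_eq >= (radius**2 - border) and circle_eq <= (radius**2 + border):
--                 circles.append((x, y))
--     return circles
-- ===== SOURCE B (Python) =====
-- from math import isqrt
--
-- def get_circles(radius, border):
--     # Per row x, solve (y-radius)^2 in [lo-d, hi-d] with integer sqrt and
--     # enumerate only the valid y-intervals instead of scanning all y.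
--     n = round(radius * 2)
--     lo = radius ** 2 - border
--     hi = radius ** 2 + border
--     out = []
--     for x in range(n):
--         d = (x - radius) ** 2
--         rem_hi = hi - d
--         if rem_hi < 0:
--             continue
--         s = isqrt(rem_hi)
--         rem_lo = lo - d
--         t = 0 if rem_lo <= 0 else isqrt(rem_lo - 1) + 1
--         if t > s:
--             continue
--         if t == 0:
--             ys = range(max(radius - s, 0), min(radius + s, n - 1) + 1)
--         else:
--             ys = list(range(max(radius - s, 0), min(radius - t, n - 1) + 1)) + \
--                  list(range(max(radius + t, 0), min(radius + s, n - 1) + 1))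
--         out.extend((x, y) for y in ys)
--     return out
-- ===== Notes on version B (the rewrite author's own statement) =====
-- stated objective: faster
-- what changed: Instead of scanning the full 2r x 2r grid and testing every (x,y), B solves the band condition per row x with integer square roots (math.isqrt) and enumerates only the valid y-intervals.
import Mathlib
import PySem

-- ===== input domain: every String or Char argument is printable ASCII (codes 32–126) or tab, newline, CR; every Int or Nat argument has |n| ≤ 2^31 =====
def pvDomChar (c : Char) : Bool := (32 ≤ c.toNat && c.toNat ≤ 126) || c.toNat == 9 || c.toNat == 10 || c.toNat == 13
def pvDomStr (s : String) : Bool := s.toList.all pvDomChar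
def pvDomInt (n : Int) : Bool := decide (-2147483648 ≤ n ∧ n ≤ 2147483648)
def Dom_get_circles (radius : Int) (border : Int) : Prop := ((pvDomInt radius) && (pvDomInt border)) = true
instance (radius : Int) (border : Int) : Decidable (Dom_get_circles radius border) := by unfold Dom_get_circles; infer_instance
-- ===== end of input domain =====

-- B replaces A's full 2r×2r grid scan by solving, per row x, the band condition for y
-- with integer square roots and enumerating only the valid y-intervals.

-- ===== PORT A =====
-- Literal port of A. `round(radius*2)` and `round(<int expression>)` are the identity
-- on Python ints (radius, border : Int), so they are ported as the expressions themselves.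
def get_circles (radius : Int) (border : Int) : List (Int × Int) :=
  (PySem.List.pyRange 0 (radius * 2) 1).foldl (fun circles x =>
    (PySem.List.pyRange 0 (radius * 2) 1).foldl (fun circles y =>
      let circle_eq := (x - radius) ^ 2 + (y - radius) ^ 2
      if radius ^ 2 - border ≤ circle_eq ∧ circle_eq ≤ radius ^ 2 + border
      then circles ++ [(x, y)] else circles) circles) []

-- ===== PORT B =====
-- The y-values B's loop body produces for one row x (math.isqrt m = Nat.sqrt m.toNat for
-- m ≥ 0; Python range(a, b) = pyRange a b 1; the two `continue`s yield the empty row).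
def altRow (radius : Int) (border : Int) (x : Int) : List Int :=
  let n := radius * 2
  let d := (x - radius) ^ 2
  let remHi := radius ^ 2 + border - d
  if remHi < 0 then []
  else
    let s : Int := (Nat.sqrt remHi.toNat : Nat)
    let remLo := radius ^ 2 - border - d
    let t : Int := if remLo ≤ 0 then 0 else ((Nat.sqrt (remLo - 1).toNat : Nat) : Int) + 1
    if s < t then []
    else if t = 0 then
      PySem.List.pyRange (max (radius - s) 0) (min (radius + s) (n - 1) + 1) 1
    else
      PySem.List.pyRange (max (radius - s) 0) (min (radius - t) (n - 1) + 1) 1 ++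
      PySem.List.pyRange (max (radius + t) 0) (min (radius + s) (n - 1) + 1) 1

def get_circles_alt (radius : Int) (border : Int) : List (Int × Int) :=
  (PySem.List.pyRange 0 (radius * 2) 1).foldl
    (fun out x => out ++ (altRow radius border x).map (fun y => (x, y))) []

-- ===== PRECONDITION & SPEC =====
def Spec_get_circles (radius : Int) (border : Int) (out : List (Int × Int)) : Prop := out = get_circles_alt radius border
instance (radius : Int) (border : Int) (out : List (Int × Int)) : Decidable (Spec_get_circles radius border out) := by unfold Spec_get_circles; infer_instance

-- ===== CLAIM (what is proved, stated in full; the proofs are below) =====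
def Claim_equal_get_circles : Prop := ∀ (radius : Int) (border : Int), Dom_get_circles radius border → Spec_get_circles radius border (get_circles radius border)

-- ===== LEMMAS AND PROOFS =====

-- two strictly increasing integer lists with the same members are equal
theorem eq_of_sorted_mem (l₁ l₂ : List Int) (h₁ : l₁.Pairwise (· < ·)) (h₂ : l₂.Pairwise (· < ·))
    (h : ∀ y, y ∈ l₁ ↔ y ∈ l₂) : l₁ = l₂ :=
  List.Perm.eq_of_pairwise
    (fun _ _ _ _ h1 h2 => absurd h2 (asymm h1)) h₁ h₂
    ((List.perm_ext_iff_of_nodup (h₁.imp ne_of_lt) (h₂.imp ne_of_lt)).mpr h)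

-- z² ≤ rem  ↔  |z| ≤ isqrt rem   (for rem ≥ 0)
theorem sq_le_iff_abs (rem z : Int) (h : 0 ≤ rem) :
    z ^ 2 ≤ rem ↔ -(Nat.sqrt rem.toNat : Int) ≤ z ∧ z ≤ (Nat.sqrt rem.toNat : Int) := by
  have h1 : z.natAbs ≤ Nat.sqrt rem.toNat ↔ z.natAbs ^ 2 ≤ rem.toNat := Nat.le_sqrt'
  have h2 : ((z.natAbs * z.natAbs : Nat) : Int) = z * z := Int.natAbs_mul_self
  rw [pow_two] at *
  omega

-- rem ≤ z²  ↔  |z| ≥ isqrt (rem-1) + 1   (for rem > 0)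
theorem le_sq_iff_abs (rem z : Int) (h : 0 < rem) :
    rem ≤ z ^ 2 ↔ (z ≤ -((Nat.sqrt (rem - 1).toNat : Int) + 1) ∨ (Nat.sqrt (rem - 1).toNat : Int) + 1 ≤ z) := by
  have h1 : Nat.sqrt (rem - 1).toNat < z.natAbs ↔ (rem - 1).toNat < z.natAbs ^ 2 := Nat.sqrt_lt'
  have h2 : ((z.natAbs * z.natAbs : Nat) : Int) = z * z := Int.natAbs_mul_self
  rw [pow_two] at *
  omega

-- per-row equivalence: A's filtered scan of row x = B's interval enumeration
theorem row_eq (radius border x : Int) :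
    (PySem.List.pyRange 0 (radius * 2) 1).filter
      (fun y => decide (radius ^ 2 - border ≤ (x - radius) ^ 2 + (y - radius) ^ 2 ∧
        (x - radius) ^ 2 + (y - radius) ^ 2 ≤ radius ^ 2 + border))
    = altRow radius border x := by
  have hd : (0 : Int) ≤ (x - radius) ^ 2 := sq_nonneg _
  apply eq_of_sorted_mem
  · exact (PySem.List.pairwise_lt_pyRange_one 0 (radius * 2)).filter _
  all_goals simp only [altRow]
  -- Pairwise of altRow
  · by_cases h1 : radius ^ 2 + border - (x - radius) ^ 2 < 0
    · rw [if_pos h1]; exact List.Pairwise.nil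
    rw [if_neg h1]
    by_cases hlo : radius ^ 2 - border - (x - radius) ^ 2 ≤ 0
    · rw [if_pos hlo, if_neg (by omega : ¬ ((Nat.sqrt (radius ^ 2 + border - (x - radius) ^ 2).toNat : Int) < 0)),
        if_pos rfl]
      exact PySem.List.pairwise_lt_pyRange_one _ _
    rw [if_neg hlo]
    by_cases hst : ((Nat.sqrt (radius ^ 2 + border - (x - radius) ^ 2).toNat : Int)) <
        (Nat.sqrt (radius ^ 2 - border - (x - radius) ^ 2 - 1).toNat : Int) + 1
    · rw [if_pos hst]; exact List.Pairwise.nil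
    rw [if_neg hst]
    split_ifs with h0
    · exact absurd h0 (by omega)
    rw [List.pairwise_append]
    refine ⟨PySem.List.pairwise_lt_pyRange_one _ _, PySem.List.pairwise_lt_pyRange_one _ _, ?_⟩
    intro a ha b hb
    rw [PySem.List.mem_pyRange_one] at ha hb
    omega
  -- membership
  · intro y
    rw [List.mem_filter, PySem.List.mem_pyRange_one, decide_eq_true_iff]
    have hy : (0 : Int) ≤ (y - radius) ^ 2 := sq_nonneg _
    by_cases h1 : radius ^ 2 + border - (x - radius) ^ 2 < 0
    · rw [if_pos h1]
      simp only [List.not_mem_nil, iff_false]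
      omega
    rw [if_neg h1]
    have hle := sq_le_iff_abs (radius ^ 2 + border - (x - radius) ^ 2) (y - radius) (by omega)
    by_cases hlo : radius ^ 2 - border - (x - radius) ^ 2 ≤ 0
    · rw [if_pos hlo, if_neg (by omega : ¬ ((Nat.sqrt (radius ^ 2 + border - (x - radius) ^ 2).toNat : Int) < 0)),
        if_pos rfl, PySem.List.mem_pyRange_one]
      omega
    rw [if_neg hlo]
    have hge := le_sq_iff_abs (radius ^ 2 - border - (x - radius) ^ 2) (y - radius) (by omega)
    by_cases hst : ((Nat.sqrt (radius ^ 2 + border - (x - radius) ^ 2).toNat : Int)) <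
        (Nat.sqrt (radius ^ 2 - border - (x - radius) ^ 2 - 1).toNat : Int) + 1
    · rw [if_pos hst]
      simp only [List.not_mem_nil, iff_false]
      omega
    rw [if_neg hst]
    split_ifs with h0
    · exact absurd h0 (by omega)
    rw [List.mem_append, PySem.List.mem_pyRange_one, PySem.List.mem_pyRange_one]
    omega

-- ===== VERDICT (by name: the statement is the Claim_ definition above) =====
theorem get_circles_spec : Claim_equal_get_circles := by
  intro radius border _
  unfold Spec_get_circles get_circles get_circles_alt
  have hinner : ∀ (x : Int) (acc : List (Int × Int)),
      (PySem.List.pyRange 0 (radius * 2) 1).foldl (fun circles y =>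
        if radius ^ 2 - border ≤ (x - radius) ^ 2 + (y - radius) ^ 2 ∧
            (x - radius) ^ 2 + (y - radius) ^ 2 ≤ radius ^ 2 + border
        then circles ++ [(x, y)] else circles) acc
      = acc ++ ((PySem.List.pyRange 0 (radius * 2) 1).filter
          (fun y => decide (radius ^ 2 - border ≤ (x - radius) ^ 2 + (y - radius) ^ 2 ∧
            (x - radius) ^ 2 + (y - radius) ^ 2 ≤ radius ^ 2 + border))).map (fun y => (x, y)) :=
    fun x acc => PySem.List.foldl_append_ite _ _ _ _
  simp only [hinner, PySem.List.foldl_append_eq_flatMap, List.nil_append, row_eq]
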